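/- GENERATED by tools/mkcompositions.py from design/units.gif.tsv (unit `DGifOpen.COMPOSITION`) — do not edit.
   THE PROOF of the composition unit `DGifOpen.COMPOSITION`: the 7 segments of `DGifOpen` chain into its contract, by the theorem
   `Gif.Spec.DGifOpen.compose` (proved next to the cut assertions). -/
import Gif.Spec.Units.DGifOpen_COMPOSITION

/-- The segments of `DGifOpen` compose into its contract. -/
theorem Gif.Spec.Proved.DGifOpen_COMPOSITION_ok : Gif.Spec.DGifOpen_COMPOSITION.Statement := by
  intro Lay _hLay μ _hμ u₀ h_DGifOpen_P h_DGifOpen_1 h_DGifOpen_2 h_DGifOpen_3 h_DGifOpen_4 h_DGifOpen_5 h_DGifOpen_E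
  apply Gif.Spec.DGifOpen.compose
  all_goals assumption
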